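-- pv_equiv track=rewrite | github.com/saronqw/Backend-news-aggregation-bot | analyzer/views.py | get_dataset_options
-- ===== SOURCE A (Python) =====
-- def get_dataset_options(index, color):
--     color_scheme = [
--         'rgba(31,119,180, 0.2)', 'rgba(255,127,14, 0.2)',
--         'rgba(44,160,44, 0.2)', 'rgba(214,39,40, 0.2)',
--         'rgba(148,103,189, 0.2)', 'rgba(140,86,75, 0.2)',
--         'rgba(227,119,194, 0.2)', 'rgba(127,127,127, 0.2)',
--         'rgba(188,189,34, 0.2)', 'rgba(23,190,207, 0.2)'
--     ]
--
--     color_scheme_without_alpha = [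
--         'rgb(0,0,139)', 'rgb(255,69,0)',
--         'rgb(0,128,0)', 'rgb(255,0,0)',
--         'rgb(148,0,211)', 'rgb(139,69,19)',
--         'rgb(255,20,147)', 'rgb(112,128,144)',
--         'rgb(205,133,63)', 'rgb(0,128,128)'
--     ]
--
--     options = [{}, {}, {}, {}, {}, {}, {}, {}, {}, {}]
--
--     color_index = 0
--     for item in options:
--         item.update(
--             {
--                 'backgroundColor': color_scheme[color_index],
--                 'borderColor': color_scheme_without_alpha[color_index],
--                 'pointBackgroundColor': color_scheme_without_alpha[color_index],
--             }
--         )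
--         color_index += 1
--
--     return options[index]
-- ===== SOURCE B (Python) =====
-- def get_dataset_options(index, color):
--     color_scheme = [
--         'rgba(31,119,180, 0.2)', 'rgba(255,127,14, 0.2)',
--         'rgba(44,160,44, 0.2)', 'rgba(214,39,40, 0.2)',
--         'rgba(148,103,189, 0.2)', 'rgba(140,86,75, 0.2)',
--         'rgba(227,119,194, 0.2)', 'rgba(127,127,127, 0.2)',
--         'rgba(188,189,34, 0.2)', 'rgba(23,190,207, 0.2)'
--     ]
--
--     color_scheme_without_alpha = [
--         'rgb(0,0,139)', 'rgb(255,69,0)',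
--         'rgb(0,128,0)', 'rgb(255,0,0)',
--         'rgb(148,0,211)', 'rgb(139,69,19)',
--         'rgb(255,20,147)', 'rgb(112,128,144)',
--         'rgb(205,133,63)', 'rgb(0,128,128)'
--     ]
--
--     background = color_scheme[index]
--     border = color_scheme_without_alpha[index]
--     return {
--         'backgroundColor': background,
--         'borderColor': border,
--         'pointBackgroundColor': border,
--     }
-- ===== Notes on version B (the rewrite author's own statement) =====
-- stated objective: simpler
-- what changed: B drops the ten-dict construction loop entirely and directly builds the single requested dict by indexing the two color lists.
import Mathlib
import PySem

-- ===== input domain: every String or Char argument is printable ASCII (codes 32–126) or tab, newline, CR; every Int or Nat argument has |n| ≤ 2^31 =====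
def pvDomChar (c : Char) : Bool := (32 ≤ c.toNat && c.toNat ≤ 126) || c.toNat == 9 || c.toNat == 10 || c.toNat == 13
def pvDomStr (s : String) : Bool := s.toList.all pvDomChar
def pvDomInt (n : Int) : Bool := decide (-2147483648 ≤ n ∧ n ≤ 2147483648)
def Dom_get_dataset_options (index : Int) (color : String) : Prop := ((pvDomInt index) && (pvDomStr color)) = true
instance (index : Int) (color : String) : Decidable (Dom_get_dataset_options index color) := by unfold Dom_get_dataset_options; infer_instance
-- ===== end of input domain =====

-- B builds only the single requested dict directly instead of constructing all ten in a loop (simpler).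

-- ===== PORT A =====
def pvColorScheme : List String :=
  ["rgba(31,119,180, 0.2)", "rgba(255,127,14, 0.2)",
   "rgba(44,160,44, 0.2)", "rgba(214,39,40, 0.2)",
   "rgba(148,103,189, 0.2)", "rgba(140,86,75, 0.2)",
   "rgba(227,119,194, 0.2)", "rgba(127,127,127, 0.2)",
   "rgba(188,189,34, 0.2)", "rgba(23,190,207, 0.2)"]

def pvColorSchemeWithoutAlpha : List String :=
  ["rgb(0,0,139)", "rgb(255,69,0)",
   "rgb(0,128,0)", "rgb(255,0,0)",
   "rgb(148,0,211)", "rgb(139,69,19)",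
   "rgb(255,20,147)", "rgb(112,128,144)",
   "rgb(205,133,63)", "rgb(0,128,128)"]

-- the for-loop over the ten dicts, carrying (updated dicts so far, color_index);
-- color_scheme[color_index] is always in range, so pyGetD is exact here
def get_dataset_options (index : Int) (color : String) : List (String × String) :=
  let options : List (PySem.Dict String String) :=
    [.empty, .empty, .empty, .empty, .empty, .empty, .empty, .empty, .empty, .empty]
  let r := options.foldl
    (fun (st : List (PySem.Dict String String) × Int) item =>
      let ci := st.2
      let item :=
        ((item.insert "backgroundColor" (PySem.List.pyGetD pvColorScheme ci "")).insert
            "borderColor" (PySem.List.pyGetD pvColorSchemeWithoutAlpha ci "")).insert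
          "pointBackgroundColor" (PySem.List.pyGetD pvColorSchemeWithoutAlpha ci "")
      (st.1 ++ [item], ci + 1))
    ([], 0)
  ((PySem.List.pyGet? r.1 index).getD PySem.Dict.empty).items

-- ===== PORT B =====
def get_dataset_options_alt (index : Int) (color : String) : List (String × String) :=
  let background := (PySem.List.pyGet? pvColorScheme index).getD ""
  let border := (PySem.List.pyGet? pvColorSchemeWithoutAlpha index).getD ""
  [("backgroundColor", background), ("borderColor", border), ("pointBackgroundColor", border)]

-- ===== PRECONDITION & SPEC =====
-- Python A raises IndexError on options[index] outside -10 ≤ index < 10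
def Pre_get_dataset_options (index : Int) (color : String) : Prop := -10 ≤ index ∧ index < 10
instance (index : Int) (color : String) : Decidable (Pre_get_dataset_options index color) := by
  unfold Pre_get_dataset_options; infer_instance
def pvWitness_get_dataset_options : Int × String := (3, "blue")

def Spec_get_dataset_options (index : Int) (color : String) (out : List (String × String)) : Prop := out = get_dataset_options_alt index color
instance (index : Int) (color : String) (out : List (String × String)) : Decidable (Spec_get_dataset_options index color out) := by unfold Spec_get_dataset_options; infer_instance

-- ===== CLAIM (what is proved, stated in full; the proofs are below) =====
def Claim_equal_get_dataset_options : Prop := ∀ (index : Int) (color : String), Dom_get_dataset_options index color → Pre_get_dataset_options index color → Spec_get_dataset_options index color (get_dataset_options index color)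

-- ===== LEMMAS AND PROOFS =====

-- ===== VERDICT (by name: the statement is the Claim_ definition above) =====
theorem get_dataset_options_spec : Claim_equal_get_dataset_options := by
  intro index color _ hpre
  obtain ⟨h1, h2⟩ := hpre
  unfold Spec_get_dataset_options
  interval_cases index <;> rfl
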